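-- pv_equiv track=rewrite | github.com/aeroblade525/rubiks-cube-backend | algorithms/Path_Find_Algorithm/Resuable/BFSAlgorithm.py | moves_corresponder_bfs
-- ===== SOURCE A (Python) =====
-- def moves_corresponder_bfs(path, move_map):
--     edge_turns = []
--     for i in range(len(path) - 1):
--         edge = (path[i], path[i + 1])
--         reverse_edge = (path[i + 1], path[i])
--
--         if edge in move_map:
--             edge_turns.append(move_map[edge])
--         elif reverse_edge in move_map:
--             edge_turns.append(move_map[reverse_edge])
--         else:
--             edge_turns.append(f"Unknown move for {edge}")
--     return edge_turns
-- ===== SOURCE B (Python) =====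
-- def moves_corresponder_bfs(path, move_map):
--     # Inverted ("scatter") strategy: instead of looking each edge up in the
--     # move table, pre-fill the whole answer with Unknown messages, build an
--     # index edge -> list of positions, then iterate the move table twice,
--     # writing each value into the positions of its forward key (marking them
--     # filled) and then into the still-unfilled positions of its reversed key.
--     edges = list(zip(path, path[1:]))
--     result = [f"Unknown move for {e}" for e in edges]
--     pos = {}
--     for i, e in enumerate(edges):
--         pos.setdefault(e, []).append(i)
--     filled = [False] * len(edges)
--     for key, v in move_map.items():
--         for i in pos.get(key, []):
--             result[i] = v
--             filled[i] = True
--     for (a, b), v in move_map.items():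
--         for i in pos.get((b, a), []):
--             if not filled[i]:
--                 result[i] = v
--     return result
-- ===== Notes on version B (the rewrite author's own statement) =====
-- stated objective: alternative
-- what changed: B inverts the control flow: it pre-fills the whole result with Unknown messages, builds an index from each consecutive edge to its list of positions, then iterates the move table scattering each value into the positions of its forward key (marking them filled) and into the still-unfilled positions of its reversed key, instead of A's per-edge dict lookups.
import Mathlib
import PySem

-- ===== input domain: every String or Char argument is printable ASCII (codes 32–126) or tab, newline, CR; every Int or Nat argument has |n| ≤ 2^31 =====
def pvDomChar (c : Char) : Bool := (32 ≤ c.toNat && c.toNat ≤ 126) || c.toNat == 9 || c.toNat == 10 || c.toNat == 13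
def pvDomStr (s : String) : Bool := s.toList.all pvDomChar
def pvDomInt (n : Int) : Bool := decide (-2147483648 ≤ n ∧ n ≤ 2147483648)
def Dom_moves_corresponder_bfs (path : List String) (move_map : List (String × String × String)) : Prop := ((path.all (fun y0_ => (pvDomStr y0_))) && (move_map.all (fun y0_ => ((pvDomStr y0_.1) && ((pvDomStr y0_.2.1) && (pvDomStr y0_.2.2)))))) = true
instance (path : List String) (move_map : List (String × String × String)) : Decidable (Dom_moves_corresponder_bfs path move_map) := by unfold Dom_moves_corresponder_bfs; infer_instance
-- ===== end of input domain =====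

-- B inverts the control flow of A: it pre-fills the result with Unknown
-- messages, indexes each consecutive edge by its positions, and scatters the
-- move table's values into the result (forward keys first, marking positions
-- filled, then reversed keys into unfilled positions) — an alternative
-- algorithm of the same cost, not claimed faster.

-- Shared formatting helper: Python's f"Unknown move for {edge}" appears
-- verbatim in both sources; this renders str((a, b)), i.e. the Python repr of
-- each string — exact on the ASCII-plus-tab/newline/CR domain (the only
-- escapes repr produces there are \\ \t \n \r and the quote character).
def pyEscChar (q : Char) (c : Char) : List Char :=
  if c = '\\' then ['\\', '\\']
  else if c = Char.ofNat 9 then ['\\', 't']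
  else if c = Char.ofNat 10 then ['\\', 'n']
  else if c = Char.ofNat 13 then ['\\', 'r']
  else if c = q then ['\\', q]
  else [c]

def pyStrRepr (s : String) : String :=
  let cs := s.toList
  let q : Char := if '\'' ∈ cs ∧ '"' ∉ cs then '"' else '\''
  String.ofList (q :: cs.flatMap (pyEscChar q) ++ [q])

def unknownMoveMsg (a b : String) : String :=
  "Unknown move for (" ++ pyStrRepr a ++ ", " ++ pyStrRepr b ++ ")"

-- ===== PORT A =====
-- move_map : dict[(str,str),str] arrives as an association list; the dict the
-- Python function receives is built by inserting the pairs in order.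
def moves_corresponder_bfs (path : List String) (move_map : List (String × String × String)) : List String :=
  let d : PySem.Dict (String × String) String :=
    move_map.foldl (fun d p => d.insert (p.1, p.2.1) p.2.2) PySem.Dict.empty
  (PySem.List.pyRange 0 ((path.length : Int) - 1)).foldl
    (fun edge_turns i =>
      let edge := (PySem.List.pyGetD path i "", PySem.List.pyGetD path (i + 1) "")
      let reverse_edge := (edge.2, edge.1)
      if d.contains edge then edge_turns ++ [d.getD edge ""]
      else if d.contains reverse_edge then edge_turns ++ [d.getD reverse_edge ""]
      else edge_turns ++ [unknownMoveMsg edge.1 edge.2]) []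

-- ===== PORT B =====
-- path[1:] is path.drop 1; enumerate over the edges is ported with zipIdx
-- (its indices are exactly the nonnegative ints 0..n-1 Python produces);
-- pos.setdefault(e, []).append(i) is Dict.modify e [] (· ++ [i]);
-- iterating move_map.items() is iterating the association list (last value
-- per key wins in both, since later writes overwrite earlier ones).
def moves_corresponder_bfs_alt (path : List String) (move_map : List (String × String × String)) : List String :=
  let edges := path.zip (path.drop 1)
  let result := edges.map (fun e => unknownMoveMsg e.1 e.2)
  let pos : PySem.Dict (String × String) (List Nat) :=
    edges.zipIdx.foldl (fun d p => d.modify p.1 [] (· ++ [p.2])) PySem.Dict.empty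
  let filled := List.replicate edges.length false
  let s1 := move_map.foldl
      (fun (s : List String × List Bool) p =>
        (pos.getD (p.1, p.2.1) []).foldl
          (fun (s : List String × List Bool) i => (s.1.set i p.2.2, s.2.set i true)) s)
      (result, filled)
  move_map.foldl
    (fun r p =>
      (pos.getD (p.2.1, p.1) []).foldl
        (fun r i => if s1.2.getD i false then r else r.set i p.2.2) r)
    s1.1

-- ===== PRECONDITION & SPEC =====
def Spec_moves_corresponder_bfs (path : List String) (move_map : List (String × String × String)) (out : List String) : Prop := out = moves_corresponder_bfs_alt path move_map
instance (path : List String) (move_map : List (String × String × String)) (out : List String) : Decidable (Spec_moves_corresponder_bfs path move_map out) := by unfold Spec_moves_corresponder_bfs; infer_instance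

-- ===== CLAIM (what is proved, stated in full; the proofs are below) =====
def Claim_equal_moves_corresponder_bfs : Prop := ∀ (path : List String) (move_map : List (String × String × String)), Dom_moves_corresponder_bfs path move_map → Spec_moves_corresponder_bfs path move_map (moves_corresponder_bfs path move_map)

-- ===== LEMMAS AND PROOFS =====

-- get? after a left fold of inserts: last matching insertion wins, else d0.
theorem foldl_insert_get?' {α κ ν : Type} [BEq κ] [LawfulBEq κ] [DecidableEq κ]
    (key : α → κ) (val : α → ν) (l : List α) (d0 : PySem.Dict κ ν) (k : κ) :
    (l.foldl (fun d p => d.insert (key p) (val p)) d0).get? k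
      = ((l.reverse.find? (fun p => k == key p)).map val).or (d0.get? k) := by
  induction l generalizing d0 with
  | nil => simp
  | cons p l ih =>
    simp only [List.foldl_cons, List.reverse_cons, List.find?_append, ih,
      PySem.Dict.get?_insert]
    by_cases hk : k = key p <;>
      cases h : l.reverse.find? (fun p => k == key p) <;>
        simp [hk]

theorem fwd_get? (l : List (String × String × String))
    (d0 : PySem.Dict (String × String) String) (k : String × String) :
    (l.foldl (fun d p => d.insert (p.1, p.2.1) p.2.2) d0).get? k
      = ((l.reverse.find? (fun p => k == (p.1, p.2.1))).map (·.2.2)).or (d0.get? k) :=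
  foldl_insert_get?' (fun p => (p.1, p.2.1)) (fun p => p.2.2) l d0 k

-- scatter fold: length preserved and elementwise reading
theorem setfold_length {α : Type} (ps : List Nat) (r : List α) (v : α) :
    (ps.foldl (fun r i => r.set i v) r).length = r.length := by
  induction ps generalizing r with
  | nil => rfl
  | cons i ps ih => simp [List.foldl_cons, ih]

theorem setfold_getElem? {α : Type} (ps : List Nat) (r : List α) (v : α) (j : Nat) :
    (ps.foldl (fun r i => r.set i v) r)[j]?
      = if j ∈ ps ∧ j < r.length then some v else r[j]? := by
  induction ps generalizing r with
  | nil => simp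
  | cons i ps ih =>
    simp only [List.foldl_cons, ih, List.length_set, List.getElem?_set]
    by_cases hij : i = j
    · by_cases hm : j ∈ ps <;> by_cases hl : j < r.length <;>
        simp [hm, hl, hij, List.mem_cons]
    · have hji : ¬ j = i := fun h => hij h.symm
      by_cases hm : j ∈ ps <;> by_cases hl : j < r.length <;>
        simp [hm, hl, hij, hji, List.mem_cons]

theorem pairfold_eq {ps : List Nat} {s : List String × List Bool} {v : String} :
    ps.foldl (fun s i => (s.1.set i v, s.2.set i true)) s
      = (ps.foldl (fun r i => r.set i v) s.1, ps.foldl (fun f i => f.set i true) s.2) := by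
  induction ps generalizing s with
  | nil => rfl
  | cons i ps ih => simp [List.foldl_cons, ih]

theorem guardfold_length (ps : List Nat) (r : List String) (v : String) (F : List Bool) :
    (ps.foldl (fun r i => if F.getD i false then r else r.set i v) r).length = r.length := by
  induction ps generalizing r with
  | nil => rfl
  | cons i ps ih =>
    simp only [List.foldl_cons]
    rw [ih]; split <;> simp

theorem guardfold_getElem? (ps : List Nat) (r : List String) (v : String) (F : List Bool) (j : Nat) :
    (ps.foldl (fun r i => if F.getD i false then r else r.set i v) r)[j]?
      = if j ∈ ps ∧ F.getD j false = false ∧ j < r.length then some v else r[j]? := by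
  induction ps generalizing r with
  | nil => simp
  | cons i ps ih =>
    simp only [List.foldl_cons]
    by_cases hFi : F.getD i false = true
    · rw [if_pos hFi, ih]
      by_cases hij : i = j
      · have hF : ¬ F[j]?.getD false = false := by
          rw [← hij]; simpa [List.getD_eq_getElem?_getD] using hFi
        simp [List.mem_cons, hF, hij, List.getD_eq_getElem?_getD]
      · have hji : ¬ j = i := fun h => hij h.symm
        simp [List.mem_cons, hji]
    · rw [if_neg hFi, ih, List.length_set]
      by_cases hij : i = j
      · have hF : F[j]?.getD false = false := by
          rw [← hij]
          simpa [List.getD_eq_getElem?_getD, Bool.not_eq_true] using hFi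
        by_cases hm : j ∈ ps <;> by_cases hl : j < r.length <;>
          simp [List.mem_cons, hm, hl, hF, hij, List.getD_eq_getElem?_getD]
      · have hji : ¬ j = i := fun h => hij h.symm
        by_cases hm : j ∈ ps <;>
          simp [List.mem_cons, hm, hij, hji]

-- the position index: membership is exactly "edges[j] = k"
theorem pos_mem (edges : List (String × String)) (k : String × String) (j : Nat) :
    (j ∈ (edges.zipIdx.foldl (fun d p => d.modify p.1 [] (· ++ [p.2]))
        (PySem.Dict.empty : PySem.Dict (String × String) (List Nat))).getD k [])
      ↔ edges[j]? = some k := by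
  rw [PySem.Dict.getD_foldl_modify_append]
  simp only [PySem.Dict.getD_empty, List.nil_append, List.mem_map, List.mem_filter,
    List.mem_zipIdx_iff_getElem?, beq_iff_eq]
  constructor
  · rintro ⟨⟨e, i⟩, ⟨hg, rfl⟩, rfl⟩
    simpa using hg
  · intro h
    exact ⟨(k, j), ⟨by simpa using h, rfl⟩, rfl⟩

-- proof-only abbreviations for B's two passes (definitionally equal to the fold
-- expressions inside moves_corresponder_bfs_alt)
def fwdFold (pos : PySem.Dict (String × String) (List Nat))
    (mm : List (String × String × String)) (s0 : List String × List Bool) :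
    List String × List Bool :=
  mm.foldl (fun (s : List String × List Bool) p =>
      (pos.getD (p.1, p.2.1) []).foldl
        (fun (s : List String × List Bool) i => (s.1.set i p.2.2, s.2.set i true)) s) s0

def revFold (pos : PySem.Dict (String × String) (List Nat)) (F : List Bool)
    (mm : List (String × String × String)) (r : List String) : List String :=
  mm.foldl (fun r p =>
      (pos.getD (p.2.1, p.1) []).foldl
        (fun r i => if F.getD i false then r else r.set i p.2.2) r) r

theorem fwd_pass (edges : List (String × String)) (pos : PySem.Dict (String × String) (List Nat))
    (hpos : ∀ k j, (j ∈ pos.getD k []) ↔ edges[j]? = some k)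
    (mm : List (String × String × String)) (r0 : List String) (f0 : List Bool)
    (hr : r0.length = edges.length) (hf : f0.length = edges.length) :
    (fwdFold pos mm (r0, f0)).1.length = edges.length ∧
    (fwdFold pos mm (r0, f0)).2.length = edges.length ∧
    (∀ j : Nat,
      (fwdFold pos mm (r0, f0)).1[j]?
        = (match mm.reverse.find? (fun p => edges[j]? == some (p.1, p.2.1)) with
           | some p => some p.2.2
           | none => r0[j]?) ∧
      (fwdFold pos mm (r0, f0)).2[j]?
        = (match mm.reverse.find? (fun p => edges[j]? == some (p.1, p.2.1)) with
           | some _ => some true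
           | none => f0[j]?)) := by
  induction mm using List.reverseRecOn with
  | nil => simp [fwdFold, hr, hf]
  | append_singleton l p ih =>
    obtain ⟨ih1, ih2, ihel⟩ := ih
    have hstep : fwdFold pos (l ++ [p]) (r0, f0)
        = ((pos.getD (p.1, p.2.1) []).foldl (fun r i => r.set i p.2.2) (fwdFold pos l (r0, f0)).1,
           (pos.getD (p.1, p.2.1) []).foldl (fun f i => f.set i true) (fwdFold pos l (r0, f0)).2) := by
      simp only [fwdFold, List.foldl_append, List.foldl_cons, List.foldl_nil, pairfold_eq]
    refine ⟨?_, ?_, ?_⟩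
    · rw [hstep]; simpa [setfold_length] using ih1
    · rw [hstep]; simpa [setfold_length] using ih2
    · intro j
      obtain ⟨ihr, ihf⟩ := ihel j
      rw [hstep]
      simp only [setfold_getElem?, List.reverse_append, List.reverse_cons,
        List.reverse_nil, List.nil_append, List.singleton_append, List.find?_cons]
      by_cases hk : edges[j]? = some (p.1, p.2.1)
      · have hj : j < edges.length := (List.getElem?_eq_some_iff.mp hk).1
        have hmem : j ∈ pos.getD (p.1, p.2.1) [] := (hpos _ j).mpr hk
        have he : edges[j] = (p.1, p.2.1) := by
          rw [List.getElem?_eq_getElem hj] at hk; exact Option.some.inj hk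
        have hb : (edges[j]? == some (p.1, p.2.1)) = true := by simp [hk]
        simp [hmem, ih1, ih2, hj, he]
      · have hnot : j ∉ pos.getD (p.1, p.2.1) [] := fun hm => hk ((hpos _ j).mp hm)
        have hb : (edges[j]? == some (p.1, p.2.1)) = false := by
          simpa using hk
        simp [hnot, hb, ihr, ihf]

theorem rev_pass (edges : List (String × String)) (pos : PySem.Dict (String × String) (List Nat))
    (hpos : ∀ k j, (j ∈ pos.getD k []) ↔ edges[j]? = some k)
    (mm : List (String × String × String)) (F : List Bool) (r1 : List String)
    (hr : r1.length = edges.length) :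
    (revFold pos F mm r1).length = edges.length ∧
    (∀ j : Nat,
      (revFold pos F mm r1)[j]?
        = if F.getD j false = true then r1[j]?
          else (match mm.reverse.find? (fun p => edges[j]? == some (p.2.1, p.1)) with
                | some p => some p.2.2
                | none => r1[j]?)) := by
  induction mm using List.reverseRecOn with
  | nil => simp [revFold, hr]
  | append_singleton l p ih =>
    obtain ⟨ih1, ihel⟩ := ih
    have hstep : revFold pos F (l ++ [p]) r1
        = (pos.getD (p.2.1, p.1) []).foldl
            (fun r i => if F.getD i false then r else r.set i p.2.2) (revFold pos F l r1) := by
      simp only [revFold, List.foldl_append, List.foldl_cons, List.foldl_nil]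
    refine ⟨?_, ?_⟩
    · rw [hstep, guardfold_length]; exact ih1
    · intro j
      have ihr := ihel j
      rw [hstep]
      simp only [guardfold_getElem?, List.reverse_append, List.reverse_cons,
        List.reverse_nil, List.nil_append, List.singleton_append, List.find?_cons]
      by_cases hF : F.getD j false = true
      · have hcond : ¬ (j ∈ pos.getD (p.2.1, p.1) [] ∧ F.getD j false = false
            ∧ j < (revFold pos F l r1).length) := by
          rintro ⟨-, h2, -⟩; rw [hF] at h2; cases h2
        rw [if_neg hcond, ihr, if_pos hF, if_pos hF]
      · have hF' : F.getD j false = false := by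
          revert hF; cases F.getD j false <;> simp
        by_cases hk : edges[j]? = some (p.2.1, p.1)
        · have hj' : j < edges.length := (List.getElem?_eq_some_iff.mp hk).1
          have hmem : j ∈ pos.getD (p.2.1, p.1) [] := (hpos _ j).mpr hk
          have he : edges[j] = (p.2.1, p.1) := by
            rw [List.getElem?_eq_getElem hj'] at hk; exact Option.some.inj hk
          have hb : (edges[j]? == some (p.2.1, p.1)) = true := by simp [hk]
          rw [if_pos ⟨hmem, hF', by rw [ih1]; exact hj'⟩, if_neg hF]
          simp [hb]
        · have hnot : j ∉ pos.getD (p.2.1, p.1) [] := fun hm => hk ((hpos _ j).mp hm)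
          have hb : (edges[j]? == some (p.2.1, p.1)) = false := by simpa using hk
          rw [if_neg (fun h => hnot h.1), ihr]
          by_cases hFt : F.getD j false = true
          · rw [if_pos hFt, if_pos hFt]
          · rw [if_neg hFt, if_neg hFt]
            simp [hb]

-- A's per-edge value
def phiA (d : PySem.Dict (String × String) String) (e : String × String) : String :=
  if d.contains e then d.getD e ""
  else if d.contains (e.2, e.1) then d.getD (e.2, e.1) ""
  else unknownMoveMsg e.1 e.2

-- A is the map of phiA over the consecutive-pairs list
theorem A_eq_map (path : List String) (move_map : List (String × String × String)) :
    moves_corresponder_bfs path move_map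
      = (path.zip (path.drop 1)).map
          (phiA (move_map.foldl (fun d p => d.insert (p.1, p.2.1) p.2.2) PySem.Dict.empty)) := by
  unfold moves_corresponder_bfs
  set d := move_map.foldl (fun d p => d.insert (p.1, p.2.1) p.2.2)
      (PySem.Dict.empty : PySem.Dict (String × String) String) with hd
  have hbody : ∀ (acc : List String) (i : Int),
      (let edge := (PySem.List.pyGetD path i "", PySem.List.pyGetD path (i + 1) "")
       let reverse_edge := (edge.2, edge.1)
       if d.contains edge then acc ++ [d.getD edge ""]
       else if d.contains reverse_edge then acc ++ [d.getD reverse_edge ""]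
       else acc ++ [unknownMoveMsg edge.1 edge.2])
      = acc ++ [phiA d (PySem.List.pyGetD path i "", PySem.List.pyGetD path (i + 1) "")] := by
    intro acc i; dsimp only [phiA]; split_ifs <;> rfl
  simp only [hbody]
  rw [PySem.List.foldl_append_singleton_eq_map]
  cases path with
  | nil => simp [PySem.List.pyRange]
  | cons s rest =>
    have hn : (((s :: rest).length : Int) - 1) = ((rest.length : Nat) : Int) := by
      simp
    rw [hn, PySem.List.pyRange_zero_natCast, List.map_map]
    apply List.ext_getElem
    · simp [List.length_zip]
    · intro j hj hj2
      have hjlen : j < rest.length := by simpa using hj2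
      have e0 : (List.drop 1 (s :: rest)) = rest := rfl
      have e1 : PySem.List.pyGetD (s :: rest) ((j : Nat) : Int) "" = (s :: rest)[j] := by
        rw [PySem.List.pyGetD_eq_getElem (s :: rest) "" (by positivity)
            (by exact_mod_cast Nat.lt_of_lt_of_le hjlen (Nat.le_succ _))]
        simp
      have e2 : PySem.List.pyGetD (s :: rest) (((j : Nat) : Int) + 1) "" = rest[j] := by
        have : (((j : Nat) : Int) + 1) = (((j + 1 : Nat)) : Int) := by push_cast; ring
        rw [this, PySem.List.pyGetD_eq_getElem (s :: rest) "" (by positivity)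
            (by exact_mod_cast Nat.succ_lt_succ hjlen)]
        simp
      simp only [List.nil_append, List.getElem_map, Function.comp_apply,
        List.getElem_range, List.getElem_zip, e0]
      rw [e1, e2]

theorem moves_corresponder_bfs_spec' (path : List String)
    (move_map : List (String × String × String)) :
    moves_corresponder_bfs path move_map = moves_corresponder_bfs_alt path move_map := by
  set edges := path.zip (path.drop 1) with hedges
  set d := move_map.foldl (fun d p => d.insert (p.1, p.2.1) p.2.2)
      (PySem.Dict.empty : PySem.Dict (String × String) String) with hd
  set pos := edges.zipIdx.foldl (fun d p => d.modify p.1 [] (· ++ [p.2]))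
      (PySem.Dict.empty : PySem.Dict (String × String) (List Nat)) with hposdef
  have hpos : ∀ k j, (j ∈ pos.getD k []) ↔ edges[j]? = some k := fun k j => pos_mem edges k j
  set r0 := edges.map (fun e => unknownMoveMsg e.1 e.2) with hr0
  set f0 := List.replicate edges.length false with hf0
  have hBdef : moves_corresponder_bfs_alt path move_map
      = revFold pos (fwdFold pos move_map (r0, f0)).2 move_map (fwdFold pos move_map (r0, f0)).1 := rfl
  obtain ⟨hL1, hL2, hEl⟩ := fwd_pass edges pos hpos move_map r0 f0 (by simp [hr0]) (by simp [hf0])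
  obtain ⟨hLrev, hElrev⟩ := rev_pass edges pos hpos move_map
      (fwdFold pos move_map (r0, f0)).2 (fwdFold pos move_map (r0, f0)).1 hL1
  rw [A_eq_map, hBdef, ← hedges, ← hd]
  apply List.ext_getElem?
  intro j
  obtain ⟨hElr, hElf⟩ := hEl j
  rw [List.getElem?_map, hElrev j]
  have hFj : (fwdFold pos move_map (r0, f0)).2.getD j false
      = (match move_map.reverse.find? (fun p => edges[j]? == some (p.1, p.2.1)) with
         | some _ => true | none => (f0[j]?).getD false) := by
    rw [List.getD_eq_getElem?_getD, hElf]
    cases move_map.reverse.find? (fun p => edges[j]? == some (p.1, p.2.1)) <;> simp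
  cases hj : edges[j]? with
  | none =>
    have hjlen : edges.length ≤ j := List.getElem?_eq_none_iff.mp hj
    rw [hj] at hElr hFj
    have hfind2 : List.find? (fun p : String × String × String =>
        (none : Option (String × String)) == some (p.2.1, p.1)) move_map.reverse = none :=
      List.find?_eq_none.mpr (fun x _ => by simp)
    have hfind1 : List.find? (fun p : String × String × String =>
        (none : Option (String × String)) == some (p.1, p.2.1)) move_map.reverse = none :=
      List.find?_eq_none.mpr (fun x _ => by simp)
    have hr0j : r0[j]? = none := by rw [hr0]; simp [hj]
    have hf0j : f0[j]? = none := by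
      rw [hf0, List.getElem?_replicate, if_neg (by omega)]
    simp only [hfind1] at hElr hFj
    simp only [hfind2]
    rw [hFj, hf0j]
    simp [hElr, hr0j]
  | some e =>
    have hj' : j < edges.length := (List.getElem?_eq_some_iff.mp hj).1
    rw [hj] at hElr hFj
    have hr0j : r0[j]? = some (unknownMoveMsg e.1 e.2) := by rw [hr0]; simp [hj]
    have hf0j : f0[j]? = some false := by
      rw [hf0, List.getElem?_replicate, if_pos hj']
    have hpred1 : (fun p : String × String × String =>
        ((some e : Option (String × String)) == some (p.1, p.2.1)))
        = (fun p => e == (p.1, p.2.1)) := by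
      funext p; simp
    have hpred2 : (fun p : String × String × String =>
        ((some e : Option (String × String)) == some (p.2.1, p.1)))
        = (fun p => (e.2, e.1) == (p.1, p.2.1)) := by
      funext p
      by_cases h1 : e.1 = p.2.1 <;> by_cases h2 : e.2 = p.1 <;>
        simp [h1, h2, Prod.ext_iff]
    have hget1 : d.get? e = (move_map.reverse.find? (fun p => e == (p.1, p.2.1))).map (·.2.2) := by
      rw [hd, fwd_get?]; simp
    have hget2 : d.get? (e.2, e.1)
        = (move_map.reverse.find? (fun p => (e.2, e.1) == (p.1, p.2.1))).map (·.2.2) := by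
      rw [hd, fwd_get?]; simp
    simp only [hpred1] at hElr hFj
    simp only [hpred2]
    simp only [Option.map_some]
    cases hfw : move_map.reverse.find? (fun p => e == (p.1, p.2.1)) with
    | some q =>
      have hcontains : d.contains e = true := by
        rw [PySem.Dict.contains_eq_isSome_get?, hget1, hfw]; rfl
      have hgetD : d.getD e "" = q.2.2 := by
        rw [PySem.Dict.getD_eq_get?_getD, hget1, hfw]; rfl
      rw [if_pos (by rw [hFj, hfw])]
      rw [hElr, hfw]
      simp [phiA, hcontains, hgetD]
    | none =>
      have hcontains : d.contains e = false := by
        rw [PySem.Dict.contains_eq_isSome_get?, hget1, hfw]; rfl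
      have hFj' : (fwdFold pos move_map (r0, f0)).2.getD j false = false := by
        rw [hFj, hfw, hf0j]; rfl
      rw [if_neg (by rw [hFj']; simp)]
      cases hrv : move_map.reverse.find? (fun p => (e.2, e.1) == (p.1, p.2.1)) with
      | some q =>
        have hcont2 : d.contains (e.2, e.1) = true := by
          rw [PySem.Dict.contains_eq_isSome_get?, hget2, hrv]; rfl
        have hgetD2 : d.getD (e.2, e.1) "" = q.2.2 := by
          rw [PySem.Dict.getD_eq_get?_getD, hget2, hrv]; rfl
        simp [phiA, hcontains, hcont2, hgetD2]
      | none =>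
        have hcont2 : d.contains (e.2, e.1) = false := by
          rw [PySem.Dict.contains_eq_isSome_get?, hget2, hrv]; rfl
        rw [hElr, hfw]
        simp [phiA, hcontains, hcont2, hr0j]

-- ===== VERDICT (by name: the statement is the Claim_ definition above) =====
theorem moves_corresponder_bfs_spec : Claim_equal_moves_corresponder_bfs := by
  intro path move_map _
  unfold Spec_moves_corresponder_bfs
  exact moves_corresponder_bfs_spec' path move_map
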